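-- pv_equiv track=rewrite | github.com/justamandd/gauss-seidel | modules/treat_matrix.py | order_by_unknown
-- ===== SOURCE A (Python) =====
-- def order_by_unknown(letters, matrix):
--     ordered_matrix = []
--     for equation in matrix:
--         line = []
--         for letter in letters:
--             for unknown in range(len(equation)):
--                 if equation[unknown][len(equation[unknown])-1] == letter:
--                     line.append(equation[unknown])
--         line.append(equation[len(equation)-1])
--         ordered_matrix.append(line)
--     return ordered_matrix
-- ===== SOURCE B (Python) =====
-- def order_by_unknown(letters, matrix):
--     ordered_matrix = []
--     for equation in matrix:
--         groups = {}
--         for term in equation: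
--             groups.setdefault(term[-1:], []).append(term)
--         line = []
--         for letter in letters:
--             line.extend(groups.get(letter, []))
--         line.append(equation[-1])
--         ordered_matrix.append(line)
--     return ordered_matrix
-- ===== Notes on version B (the rewrite author's own statement) =====
-- stated objective: faster
-- what changed: Per equation, B builds a last-character-to-terms dict in one pass and answers each letter by lookup, replacing A's rescan of every term for every letter.
import Mathlib
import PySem

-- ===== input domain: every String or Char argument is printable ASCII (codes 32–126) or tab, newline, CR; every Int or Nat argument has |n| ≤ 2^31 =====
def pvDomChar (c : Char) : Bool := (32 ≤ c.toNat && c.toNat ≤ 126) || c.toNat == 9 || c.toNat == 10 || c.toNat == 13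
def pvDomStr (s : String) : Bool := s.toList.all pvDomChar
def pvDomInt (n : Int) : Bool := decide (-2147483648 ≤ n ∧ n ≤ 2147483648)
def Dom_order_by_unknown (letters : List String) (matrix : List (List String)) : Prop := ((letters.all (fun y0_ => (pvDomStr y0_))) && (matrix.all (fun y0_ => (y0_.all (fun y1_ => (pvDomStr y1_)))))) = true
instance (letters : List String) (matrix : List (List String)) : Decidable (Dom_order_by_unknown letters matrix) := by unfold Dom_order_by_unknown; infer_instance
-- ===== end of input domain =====

-- B replaces A's per-letter rescans of every equation with one dict (last-char slice → terms)
-- built per equation and looked up per letter; same return value wherever A returns.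

-- ===== PORT A =====
-- equation[unknown][len(equation[unknown])-1] (IndexError on "" is Pre_'s to exclude: none here)
def pvLastA (t : String) : Option Char := PySem.Str.pyGet? t (PySem.Str.len t - 1)

-- 'equation[unknown][...] == letter': the one-char string equals letter
def pvMatchA (t : String) (letter : String) : Bool :=
  match pvLastA t with
  | some c => String.ofList [c] == letter
  | none => false

def order_by_unknown (letters : List String) (matrix : List (List String)) : List (List String) :=
  matrix.foldl (fun ordered_matrix equation =>
    let line := letters.foldl (fun line letter =>
      (PySem.List.pyRange 0 (equation.length : Int) 1).foldl (fun line unknown =>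
        match PySem.List.pyGet? equation unknown with
        | some t => if pvMatchA t letter then line ++ [t] else line
        | none => line) line) []
    ordered_matrix ++
      [line ++ [(PySem.List.pyGet? equation ((equation.length : Int) - 1)).getD ""]]) []

-- ===== PORT B =====
-- term[-1:] — a slice, empty string on "", never raises
def pvKeyB (t : String) : String := PySem.Str.slice t (some (-1)) none

def order_by_unknown_alt (letters : List String) (matrix : List (List String)) : List (List String) :=
  matrix.map (fun equation =>
    -- groups.setdefault(term[-1:], []).append(term)  ==  groups[k] = groups.get(k, []) + [term]
    let groups := equation.foldl (fun d term =>
      PySem.Dict.modify d (pvKeyB term) [] (fun l => l ++ [term]))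
      (PySem.Dict.empty : PySem.Dict String (List String))
    letters.foldl (fun line letter => line ++ groups.getD letter []) []
      ++ [(PySem.List.pyGet? equation (-1)).getD ""])

-- ===== PRECONDITION & SPEC =====
-- Pre_ excludes exactly the inputs on which A raises IndexError: an empty equation
-- (equation[-1] raises), and, when letters is nonempty, an empty-string term
-- (term[len(term)-1] raises inside the letters loop).
def Pre_order_by_unknown (letters : List String) (matrix : List (List String)) : Prop :=
  ∀ eq ∈ matrix, eq ≠ [] ∧ (letters ≠ [] → ∀ t ∈ eq, t ≠ "")
instance (letters : List String) (matrix : List (List String)) : Decidable (Pre_order_by_unknown letters matrix) := by unfold Pre_order_by_unknown; infer_instance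

def pvWitness_order_by_unknown : List String × List (List String) :=
  (["x", "y"], [["2x", "3y", "5"], ["1y", "4x", "7"]])

def Spec_order_by_unknown (letters : List String) (matrix : List (List String)) (out : List (List String)) : Prop := out = order_by_unknown_alt letters matrix
instance (letters : List String) (matrix : List (List String)) (out : List (List String)) : Decidable (Spec_order_by_unknown letters matrix out) := by unfold Spec_order_by_unknown; infer_instance

-- ===== CLAIM (what is proved, stated in full; the proofs are below) =====
def Claim_equal_order_by_unknown : Prop := ∀ (letters : List String) (matrix : List (List String)), Dom_order_by_unknown letters matrix → Pre_order_by_unknown letters matrix → Spec_order_by_unknown letters matrix (order_by_unknown letters matrix)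

-- ===== LEMMAS AND PROOFS =====

-- xs[len(xs)-1] and xs[-1] pick the same element (both none on []).
theorem pvGetLenSub1 {α : Type} (xs : List α) :
    PySem.List.pyGet? xs ((xs.length : Int) - 1) = PySem.List.pyGet? xs (-1) := by
  cases xs with
  | nil => rfl
  | cons x xs =>
    rw [PySem.List.pyGet?_neg_one,
        PySem.List.pyGet?_of_nonneg _ (by simp)]
    have : (((x :: xs).length : Int) - 1).toNat = (x :: xs).length - 1 := by
      omega
    rw [this, List.getLast?_eq_getElem?]

-- a nonempty list's final drop is its singleton last element, matching getLast?
theorem pvDropLast {α : Type} (xs : List α) (h : xs ≠ []) :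
    ∃ c, xs.getLast? = some c ∧ xs.drop (xs.length - 1) = [c] := by
  induction xs with
  | nil => exact absurd rfl h
  | cons x xs ih =>
    cases hx : xs with
    | nil => exact ⟨x, by simp, by simp⟩
    | cons y ys =>
      subst hx
      obtain ⟨c, hc1, hc2⟩ := ih (by simp)
      refine ⟨c, by simpa using hc1, ?_⟩
      have hlen : (x :: y :: ys).length - 1 = (y :: ys).length - 1 + 1 := by
        simp
      rw [hlen, List.drop_succ_cons, hc2]

-- on a nonempty term, B's slice key is the one-char string A compares with
theorem pvKeyB_of_ne (t : String) (h : t ≠ "") :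
    ∃ c, pvLastA t = some c ∧ pvKeyB t = String.ofList [c] := by
  have hne : t.toList ≠ [] := by
    intro hl; exact h (by cases t; simp_all)
  obtain ⟨c, hc1, hc2⟩ := pvDropLast t.toList hne
  refine ⟨c, ?_, ?_⟩
  · simp only [pvLastA, PySem.Str.pyGet?_eq, PySem.Chars.pyGet?_eq_listPyGet?,
      PySem.Str.len_eq]
    rw [pvGetLenSub1, PySem.List.pyGet?_neg_one, hc1]
  · have : (PySem.Str.slice t (some (-1)) none).toList
        = PySem.List.slice t.toList (some (-1)) none := by
      simp [PySem.Str.toList_slice]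
    rw [PySem.List.slice_from_neg_one, hc2] at this
    unfold pvKeyB
    apply String.toList_inj.mp
    rw [this]
    exact String.toList_ofList.symm

theorem pvMatch_eq_key (t : String) (h : t ≠ "") (letter : String) :
    pvMatchA t letter = (pvKeyB t == letter) := by
  obtain ⟨c, hc1, hc2⟩ := pvKeyB_of_ne t h
  simp [pvMatchA, hc1, hc2]

-- A's inner index loop collects, in order, the terms whose last char equals letter.
theorem pvInnerA (eq : List String) (letter : String) (line : List String) :
    (PySem.List.pyRange 0 (eq.length : Int) 1).foldl (fun line unknown =>
        match PySem.List.pyGet? eq unknown with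
        | some t => if pvMatchA t letter then line ++ [t] else line
        | none => line) line
      = line ++ eq.filter (fun t => pvMatchA t letter) := by
  have h1 : (PySem.List.pyRange 0 (eq.length : Int) 1).foldl (fun line unknown =>
        match PySem.List.pyGet? eq unknown with
        | some t => if pvMatchA t letter then line ++ [t] else line
        | none => line) line
      = (PySem.List.pyRange 0 (eq.length : Int) 1).foldl (fun line unknown =>
          (fun acc t => if pvMatchA t letter then acc ++ [t] else acc) line
            (PySem.List.pyGetD eq unknown "")) line := by
    apply PySem.List.foldl_congr_mem
    intro acc u hu
    rw [PySem.List.mem_pyRange_one] at hu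
    rw [PySem.List.pyGet?_eq_some_getElem eq hu.1 (by exact_mod_cast hu.2),
        PySem.List.pyGetD_eq_getElem eq "" hu.1 (by exact_mod_cast hu.2)]
  rw [h1, PySem.List.foldl_pyRange_zero_pyGetD' eq ""
        (fun acc t => if pvMatchA t letter then acc ++ [t] else acc) line]
  have := PySem.List.foldl_append_if (fun t => pvMatchA t letter) (id : String → String) eq line
  simpa using this

-- B's dict, after the whole equation is grouped, answers each letter with a filter on the key.
theorem pvGroupsD (eq : List String) (letter : String)
    (d : PySem.Dict String (List String)) :
    (eq.foldl (fun d term =>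
        PySem.Dict.modify d (pvKeyB term) [] (fun l => l ++ [term])) d).getD letter []
      = d.getD letter [] ++ eq.filter (fun t => pvKeyB t == letter) := by
  induction eq generalizing d with
  | nil => simp
  | cons t rest ih =>
    simp only [List.foldl_cons, List.filter_cons]
    rw [ih]
    by_cases he : pvKeyB t = letter
    · subst he
      rw [PySem.Dict.getD_modify_self]
      simp [List.append_assoc]
    · rw [PySem.Dict.getD_modify_of_ne]
      · simp [he]
      · exact fun h => he h.symm

-- One equation: A's selection loop and B's grouped dict build the same line.
theorem pvLineEq (letters : List String) (eq : List String)
    (h : letters ≠ [] → ∀ t ∈ eq, t ≠ "") :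
    (letters.foldl (fun line letter =>
        (PySem.List.pyRange 0 (eq.length : Int) 1).foldl (fun line unknown =>
          match PySem.List.pyGet? eq unknown with
          | some t => if pvMatchA t letter then line ++ [t] else line
          | none => line) line) [])
      ++ [(PySem.List.pyGet? eq ((eq.length : Int) - 1)).getD ""]
    = (letters.foldl (fun line letter => line ++
          (eq.foldl (fun d term =>
            PySem.Dict.modify d (pvKeyB term) [] (fun l => l ++ [term]))
            (PySem.Dict.empty : PySem.Dict String (List String))).getD letter []) [])
      ++ [(PySem.List.pyGet? eq (-1)).getD ""] := by
  rw [pvGetLenSub1]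
  congr 1
  cases hl : letters with
  | nil => rfl
  | cons l ls =>
    rw [← hl]
    apply PySem.List.foldl_congr_mem
    intro acc letter _
    rw [pvInnerA, pvGroupsD]
    simp only [PySem.Dict.getD_empty, List.nil_append]
    congr 1
    apply List.filter_congr
    intro t ht
    exact pvMatch_eq_key t (h (by simp [hl]) t ht) letter

-- A's outer accumulator loop is B's map, equation by equation.
theorem pvTop (letters : List String) (matrix : List (List String))
    (hpre : ∀ eq ∈ matrix, eq ≠ [] ∧ (letters ≠ [] → ∀ t ∈ eq, t ≠ ""))
    (acc : List (List String)) :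
    matrix.foldl (fun ordered_matrix equation =>
      let line := letters.foldl (fun line letter =>
        (PySem.List.pyRange 0 (equation.length : Int) 1).foldl (fun line unknown =>
          match PySem.List.pyGet? equation unknown with
          | some t => if pvMatchA t letter then line ++ [t] else line
          | none => line) line) []
      ordered_matrix ++
        [line ++ [(PySem.List.pyGet? equation ((equation.length : Int) - 1)).getD ""]]) acc
    = acc ++ matrix.map (fun equation =>
        let groups := equation.foldl (fun d term =>
          PySem.Dict.modify d (pvKeyB term) [] (fun l => l ++ [term]))
          (PySem.Dict.empty : PySem.Dict String (List String))
        letters.foldl (fun line letter => line ++ groups.getD letter []) []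
          ++ [(PySem.List.pyGet? equation (-1)).getD ""]) := by
  induction matrix generalizing acc with
  | nil => simp
  | cons eq rest ih =>
    simp only [List.foldl_cons, List.map_cons]
    rw [ih (fun e he => hpre e (List.mem_cons_of_mem _ he)),
        pvLineEq letters eq (hpre eq (List.mem_cons_self) |>.2)]
    simp

-- ===== VERDICT (by name: the statement is the Claim_ definition above) =====
theorem order_by_unknown_spec : Claim_equal_order_by_unknown := by
  intro letters matrix _ hpre
  unfold Spec_order_by_unknown order_by_unknown order_by_unknown_alt
  simpa using pvTop letters matrix hpre []
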